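-- pv_equiv track=rewrite | github.com/narpfel/adventofcode | 2024/12/python/solution.py | border_tiles
-- ===== SOURCE A (Python) =====
-- def neighbours(x, y):
--     return [
--         (x - 1, y),
--         (x + 1, y),
--         (x, y - 1),
--         (x, y + 1),
--     ]
--
-- def border_tiles(garden, region):
--     scale = 3
--     return {
--         (x * scale + dx, y * scale + dy)
--         for x, y in region
--         for dx in range(scale)
--         for dy in range(scale)
--         if any(
--             (nx // scale, ny // scale) not in region
--             for nx, ny in neighbours(x * scale + dx, y * scale + dy)
--         )
--     }
-- ===== SOURCE B (Python) =====
-- def border_tiles(garden, region):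
--     # Edge-strip enumeration: 4 direct neighbour-cell lookups per cell (hash set),
--     # then emit whole outer columns/rows of the 3x3 block for each missing neighbour.
--     cells = set(region)
--     result = set()
--     for x, y in region:
--         left = (x - 1, y) not in cells
--         right = (x + 1, y) not in cells
--         down = (x, y - 1) not in cells
--         up = (x, y + 1) not in cells
--         for dx in range(3):
--             if (dx == 0 and left) or (dx == 2 and right):
--                 for dy in range(3):
--                     result.add((3 * x + dx, 3 * y + dy))
--             else:
--                 if down:
--                     result.add((3 * x + dx, 3 * y))
--                 if up:
--                     result.add((3 * x + dx, 3 * y + 2))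
--     return result
-- ===== Notes on version B (the rewrite author's own statement) =====
-- stated objective: faster
-- what changed: Instead of testing each of the 9 subtiles of a cell by floor-dividing all 4 of its scaled neighbours back to cells and scanning the region list, B does 4 direct neighbour-cell lookups in a prebuilt hash set per cell and emits whole outer edge strips of the 3x3 block for each missing neighbour.
import Mathlib
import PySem

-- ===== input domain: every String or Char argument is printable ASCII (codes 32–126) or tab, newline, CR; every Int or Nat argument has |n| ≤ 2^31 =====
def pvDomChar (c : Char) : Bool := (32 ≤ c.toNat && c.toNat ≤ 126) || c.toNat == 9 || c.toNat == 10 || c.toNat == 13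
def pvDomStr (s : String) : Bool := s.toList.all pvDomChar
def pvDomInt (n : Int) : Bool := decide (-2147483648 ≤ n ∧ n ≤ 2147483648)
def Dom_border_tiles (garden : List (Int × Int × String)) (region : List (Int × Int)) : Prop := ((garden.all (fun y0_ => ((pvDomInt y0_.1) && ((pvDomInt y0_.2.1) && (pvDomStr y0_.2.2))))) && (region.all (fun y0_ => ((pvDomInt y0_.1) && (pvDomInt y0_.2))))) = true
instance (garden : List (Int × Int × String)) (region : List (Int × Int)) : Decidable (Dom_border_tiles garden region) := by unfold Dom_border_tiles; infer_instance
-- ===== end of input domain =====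

-- B replaces A's per-subtile scan of 36 scaled neighbours (with //-division and list
-- membership) by 4 direct neighbour-cell set lookups per cell, emitting whole edge strips.

-- ===== PORT A =====
def neighbours (x y : Int) : List (Int × Int) :=
  [(x - 1, y), (x + 1, y), (x, y - 1), (x, y + 1)]

def border_tiles (garden : List (Int × Int × String)) (region : List (Int × Int)) : List (Int × Int) :=
  region.foldl (fun s xy =>
    (PySem.List.pyRange 0 3 1).foldl (fun s dx =>
      (PySem.List.pyRange 0 3 1).foldl (fun s dy =>
        if (neighbours (xy.1 * 3 + dx) (xy.2 * 3 + dy)).any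
            (fun n => !((PySem.Int.floordiv n.1 3, PySem.Int.floordiv n.2 3) ∈ region)) then
          PySem.Set.add s (xy.1 * 3 + dx, xy.2 * 3 + dy)
        else s) s) s) PySem.Set.empty

-- ===== PORT B =====
def border_tiles_alt (garden : List (Int × Int × String)) (region : List (Int × Int)) : List (Int × Int) :=
  let cells := PySem.Set.ofList region
  region.foldl (fun s xy =>
    let l := !((xy.1 - 1, xy.2) ∈ cells)
    let r := !((xy.1 + 1, xy.2) ∈ cells)
    let d := !((xy.1, xy.2 - 1) ∈ cells)
    let u := !((xy.1, xy.2 + 1) ∈ cells)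
    (PySem.List.pyRange 0 3 1).foldl (fun s dx =>
      if (dx == 0 && l) || (dx == 2 && r) then
        (PySem.List.pyRange 0 3 1).foldl (fun s dy =>
          PySem.Set.add s (3 * xy.1 + dx, 3 * xy.2 + dy)) s
      else
        let s := if d then PySem.Set.add s (3 * xy.1 + dx, 3 * xy.2) else s
        if u then PySem.Set.add s (3 * xy.1 + dx, 3 * xy.2 + 2) else s) s) PySem.Set.empty

-- ===== PRECONDITION & SPEC =====
def Spec_border_tiles (garden : List (Int × Int × String)) (region : List (Int × Int)) (out : List (Int × Int)) : Prop := out = border_tiles_alt garden region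
instance (garden : List (Int × Int × String)) (region : List (Int × Int)) (out : List (Int × Int)) : Decidable (Spec_border_tiles garden region out) := by unfold Spec_border_tiles; infer_instance

-- ===== CLAIM (what is proved, stated in full; the proofs are below) =====
def Claim_equal_border_tiles : Prop := ∀ (garden : List (Int × Int × String)) (region : List (Int × Int)), Dom_border_tiles garden region → Spec_border_tiles garden region (border_tiles garden region)

-- ===== LEMMAS AND PROOFS =====

-- For one cell (x, y) of `region`, A's 3×3 per-subtile neighbour scan performs exactly the
-- same sequence of set insertions as B's edge-strip emission.
theorem border_tiles_eq_alt (garden : List (Int × Int × String)) (region : List (Int × Int)) :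
    border_tiles garden region = border_tiles_alt garden region := by
  unfold border_tiles border_tiles_alt
  refine PySem.List.foldl_congr_mem region _ _ _ ?_
  intro acc xy hx
  obtain ⟨x, y⟩ := xy
  have hrg : PySem.List.pyRange 0 3 1 = [0, 1, 2] := by decide
  have f1 : ∀ a : Int, PySem.Int.floordiv (a*3 + 0 - 1) 3 = a - 1 := by
    intro a; rw [PySem.Int.floordiv_eq_ediv_of_pos (by norm_num)]; omega
  have f2 : ∀ a : Int, PySem.Int.floordiv (a*3 + 0 + 1) 3 = a := by
    intro a; rw [PySem.Int.floordiv_eq_ediv_of_pos (by norm_num)]; omega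
  have f3 : ∀ a : Int, PySem.Int.floordiv (a*3 + 0) 3 = a := by
    intro a; rw [PySem.Int.floordiv_eq_ediv_of_pos (by norm_num)]; omega
  have f4 : ∀ a : Int, PySem.Int.floordiv (a*3 + 1 - 1) 3 = a := by
    intro a; rw [PySem.Int.floordiv_eq_ediv_of_pos (by norm_num)]; omega
  have f5 : ∀ a : Int, PySem.Int.floordiv (a*3 + 1 + 1) 3 = a := by
    intro a; rw [PySem.Int.floordiv_eq_ediv_of_pos (by norm_num)]; omega
  have f6 : ∀ a : Int, PySem.Int.floordiv (a*3 + 1) 3 = a := by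
    intro a; rw [PySem.Int.floordiv_eq_ediv_of_pos (by norm_num)]; omega
  have f7 : ∀ a : Int, PySem.Int.floordiv (a*3 + 2 - 1) 3 = a := by
    intro a; rw [PySem.Int.floordiv_eq_ediv_of_pos (by norm_num)]; omega
  have f8 : ∀ a : Int, PySem.Int.floordiv (a*3 + 2 + 1) 3 = a + 1 := by
    intro a; rw [PySem.Int.floordiv_eq_ediv_of_pos (by norm_num)]; omega
  have f9 : ∀ a : Int, PySem.Int.floordiv (a*3 + 2) 3 = a := by
    intro a; rw [PySem.Int.floordiv_eq_ediv_of_pos (by norm_num)]; omega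
  simp only [hrg, List.foldl_cons, List.foldl_nil, neighbours, List.any_cons, List.any_nil,
    f1, f2, f3, f4, f5, f6, f7, f8, f9, PySem.Set.mem_ofList]
  by_cases hl : (x - 1, y) ∈ region <;> by_cases hr : (x + 1, y) ∈ region <;>
    by_cases hd : (x, y - 1) ∈ region <;> by_cases hu : (x, y + 1) ∈ region <;>
    simp [hl, hr, hd, hu, hx] <;> ring_nf

-- ===== VERDICT (by name: the statement is the Claim_ definition above) =====
theorem border_tiles_spec : Claim_equal_border_tiles := by
  intro garden region _
  unfold Spec_border_tiles
  exact border_tiles_eq_alt garden region
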